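-- pv_equiv track=rewrite | github.com/DanielVF/checklist-pdf | transpose_md.py | parse_md
-- ===== SOURCE A (Python) =====
-- from collections import OrderedDict
--
-- def parse_md(lines: list[str]) -> OrderedDict[str, OrderedDict[str, list[str]]]:
--     """Parse markdown into {h1: {h2: [content_lines]}} preserving order."""
--     result: OrderedDict[str, OrderedDict[str, list[str]]] = OrderedDict()
--     current_h1 = None
--     current_h2 = None
--
--     for line in lines:
--         if line.startswith("# "):
--             current_h1 = line[2:].strip()
--             current_h2 = None
--             if current_h1 not in result:
--                 result[current_h1] = OrderedDict()
--         elif line.startswith("## ") and current_h1 is not None: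
--             current_h2 = line[3:].strip()
--             if current_h2 not in result[current_h1]:
--                 result[current_h1][current_h2] = []
--         elif current_h1 is not None and current_h2 is not None:
--             result[current_h1][current_h2].append(line)
--
--     return result
-- ===== SOURCE B (Python) =====
-- from collections import OrderedDict
--
--
-- def _segments(lines, prefix):
--     """Split lines into (header, body) segments at lines starting with prefix,
--     dropping any lines before the first header."""
--     segs = []
--     i, n = 0, len(lines)
--     while i < n:
--         if lines[i].startswith(prefix):
--             j = i + 1
--             while j < n and not lines[j].startswith(prefix):
--                 j += 1
--             segs.append((lines[i][len(prefix):].strip(), lines[i + 1:j]))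
--             i = j
--         else:
--             i += 1
--     return segs
--
--
-- def parse_md(lines: list[str]) -> OrderedDict[str, OrderedDict[str, list[str]]]:
--     """Parse markdown into {h1: {h2: [content_lines]}} preserving order."""
--     result: OrderedDict[str, OrderedDict[str, list[str]]] = OrderedDict()
--     for h1, body in _segments(lines, "# "):
--         sub = result.setdefault(h1, OrderedDict())
--         for h2, content in _segments(body, "## "):
--             sub.setdefault(h2, []).extend(content)
--     return result
-- ===== Notes on version B (the rewrite author's own statement) =====
-- stated objective: alternative
-- what changed: Instead of one flat loop carrying current_h1/current_h2 state, B splits the input into h1-blocks with a generic segment splitter, splits each block body into h2-segments with the same splitter, and folds the segments into the nested OrderedDict, merging repeated header names via setdefault/extend.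
import Mathlib
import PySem

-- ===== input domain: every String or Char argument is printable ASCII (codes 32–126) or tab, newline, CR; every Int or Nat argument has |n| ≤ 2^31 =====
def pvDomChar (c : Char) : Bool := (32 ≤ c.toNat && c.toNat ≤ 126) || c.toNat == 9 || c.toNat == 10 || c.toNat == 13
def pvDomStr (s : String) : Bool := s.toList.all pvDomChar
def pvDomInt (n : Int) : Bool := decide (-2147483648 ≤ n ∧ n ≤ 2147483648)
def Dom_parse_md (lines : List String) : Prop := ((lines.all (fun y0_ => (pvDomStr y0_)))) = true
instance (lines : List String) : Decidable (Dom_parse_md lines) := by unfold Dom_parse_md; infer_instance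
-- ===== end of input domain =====

-- B replaces A's flat loop with state (current_h1, current_h2) by a generic segment splitter applied
-- twice (h1-blocks, then h2-subsegments per block) and a fold merging the segments into the nested dict.

-- ===== PORT A =====
-- One fold step of A's loop; state = (result, current_h1, current_h2).
-- A reads result[current_h1] / result[current_h1][current_h2] only when present (loop invariant),
-- so getD/modify with a default is exact on every reachable state.
def pmStep (st : PySem.Dict String (PySem.Dict String (List String)) × Option String × Option String)
    (line : String) :
    PySem.Dict String (PySem.Dict String (List String)) × Option String × Option String :=
  if PySem.Str.startswith line "# " then
    let h1 := PySem.Str.strip (PySem.Str.slice line (some 2) none)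
    (if st.1.contains h1 then st.1 else st.1.insert h1 PySem.Dict.empty, some h1, none)
  else if PySem.Str.startswith line "## " then
    match st.2.1 with
    | some h1 =>
        let h2 := PySem.Str.strip (PySem.Str.slice line (some 3) none)
        (if (st.1.getD h1 PySem.Dict.empty).contains h2 then st.1
         else st.1.modify h1 PySem.Dict.empty (fun inner => inner.insert h2 []),
         some h1, some h2)
    | none => st
  else
    match st.2.1, st.2.2 with
    | some h1, some h2 =>
        (st.1.modify h1 PySem.Dict.empty (fun inner => inner.modify h2 [] (fun c => c ++ [line])),
         some h1, some h2)
    | _, _ => st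

def parse_md (lines : List String) : List (String × List (String × List String)) :=
  let fin := lines.foldl pmStep (PySem.Dict.empty, none, none)
  fin.1.items.map (fun p => (p.1, p.2.items))

-- ===== PORT B =====
-- _segments(lines, prefix): the index scan for the end of a segment is the takeWhile/dropWhile span.
def pmSeg (pre : String) : List String → List (String × List String)
  | [] => []
  | l :: rest =>
    if PySem.Str.startswith l pre then
      (PySem.Str.strip (PySem.Str.slice l (some (PySem.Str.len pre)) none),
        rest.takeWhile (fun x => !PySem.Str.startswith x pre)) ::
      pmSeg pre (rest.dropWhile (fun x => !PySem.Str.startswith x pre))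
    else pmSeg pre rest
termination_by ls => ls.length
decreasing_by
  · exact Nat.lt_succ_of_le (List.length_dropWhile_le _ _)
  · exact Nat.lt_succ_self _

-- inner loop: sub.setdefault(h2, []).extend(content)  =  sub[h2] = sub.get(h2, []) + content
def pmApplyBody (sub : PySem.Dict String (List String)) (body : List String) :
    PySem.Dict String (List String) :=
  (pmSeg "## " body).foldl (fun s c => s.modify c.1 [] (fun v => v ++ c.2)) sub

def parse_md_alt (lines : List String) : List (String × List (String × List String)) :=
  let d := (pmSeg "# " lines).foldl
    (fun res b => res.modify b.1 PySem.Dict.empty (fun sub => pmApplyBody sub b.2))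
    PySem.Dict.empty
  d.items.map (fun p => (p.1, p.2.items))

-- ===== PRECONDITION & SPEC =====
def Spec_parse_md (lines : List String) (out : List (String × List (String × List String))) : Prop := out = parse_md_alt lines
instance (lines : List String) (out : List (String × List (String × List String))) : Decidable (Spec_parse_md lines out) := by unfold Spec_parse_md; infer_instance

-- ===== CLAIM (what is proved, stated in full; the proofs are below) =====
def Claim_equal_parse_md : Prop := ∀ (lines : List String), Dom_parse_md lines → Spec_parse_md lines (parse_md lines)

-- ===== LEMMAS AND PROOFS =====

-- ---- generic Dict facts (specific composites of insert/modify not named in the library) ----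

theorem pm_map_self {κ ν : Type} [BEq κ] [LawfulBEq κ] (k : κ) (v : ν) :
    ∀ (l : List (κ × ν)), (l.map Prod.fst).Nodup →
      (l.find? (fun p => p.1 == k)).map (fun x => x.2) = some v →
      l.map (fun p => if p.1 == k then (k, v) else p) = l := by
  intro l
  induction l with
  | nil => intro _ h; cases h
  | cons p t ih =>
    intro hnd h
    simp only [List.map_cons, List.nodup_cons] at hnd
    cases hp : (p.1 == k) with
    | true =>
      simp only [List.find?_cons, hp, Option.map_some, Option.some.injEq] at h
      have hk : p.1 = k := by exact eq_of_beq hp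
      have hpv : p = (k, v) := by
        cases p with | mk a b => simp only at hk h; rw [hk, ← h]
      have ht : ∀ q ∈ t, (if (q.1 == k) = true then (k, v) else q) = q := by
        intro q hq
        rw [if_neg]
        intro hqk
        apply hnd.1
        have hq1 : q.1 = k := eq_of_beq hqk
        rw [hk, ← hq1]
        exact List.mem_map_of_mem hq
      simp only [List.map_cons, if_pos hp]
      rw [List.map_congr_left ht]
      simp [← hpv]
    | false =>
      simp only [List.find?_cons, hp] at h
      simp only [List.map_cons, hp, Bool.false_eq_true, if_false]
      rw [ih hnd.2 h]

theorem pm_insert_self {κ ν : Type} [BEq κ] [LawfulBEq κ] (d : PySem.Dict κ ν) (k : κ) (v : ν)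
    (hnd : d.keys.Nodup) (h : d.get? k = some v) : d.insert k v = d := by
  cases hc : d.contains k with
  | false =>
    rw [← PySem.Dict.get?_eq_none_iff_contains] at hc
    rw [hc] at h; cases h
  | true =>
    cases d with
    | mk l =>
      simp only [PySem.Dict.insert, hc, if_true]
      congr 1
      exact pm_map_self k v l hnd h

theorem pm_get?_of_contains {κ ν : Type} [BEq κ] [LawfulBEq κ] (d : PySem.Dict κ ν) (k : κ)
    (h : d.contains k = true) : ∃ v, d.get? k = some v := by
  cases hg : d.get? k with
  | none => rw [PySem.Dict.get?_eq_none_iff_contains, h] at hg; cases hg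
  | some v => exact ⟨v, rfl⟩

theorem pm_modify_modify {κ ν : Type} [BEq κ] [LawfulBEq κ] (d : PySem.Dict κ ν) (k : κ)
    (d0 d1 : ν) (f g : ν → ν) :
    (d.modify k d0 f).modify k d1 g = d.modify k d0 (fun v => g (f v)) := by
  simp [PySem.Dict.modify, PySem.Dict.getD_insert_self, PySem.Dict.insert_insert_self]

theorem pm_modify_congr {κ ν : Type} [BEq κ] (d : PySem.Dict κ ν) {k : κ} {v : ν}
    (d0 d1 : ν) (f g : ν → ν) (h : d.get? k = some v) (hfg : f v = g v) :
    d.modify k d0 f = d.modify k d1 g := by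
  simp [PySem.Dict.modify, PySem.Dict.getD_of_get?_eq_some _ _ h, hfg]

theorem pm_modify_id {κ ν : Type} [BEq κ] [LawfulBEq κ] (d : PySem.Dict κ ν) {k : κ} {v : ν}
    (d0 : ν) (f : ν → ν) (hnd : d.keys.Nodup) (h : d.get? k = some v) (hf : f v = v) :
    d.modify k d0 f = d := by
  unfold PySem.Dict.modify
  rw [PySem.Dict.getD_of_get?_eq_some _ _ h, hf]
  exact pm_insert_self d k v hnd h

theorem pm_nodup_modify {κ ν : Type} [BEq κ] [LawfulBEq κ] (d : PySem.Dict κ ν) (k : κ)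
    (d0 : ν) (f : ν → ν) (hnd : d.keys.Nodup) : (d.modify k d0 f).keys.Nodup := by
  rw [PySem.Dict.keys_modify]
  exact PySem.Dict.nodup_keys_insert _ _ _ hnd

-- ---- the invariant: unique keys outside and inside ----

def pmInv (res : PySem.Dict String (PySem.Dict String (List String))) : Prop :=
  res.keys.Nodup ∧ ∀ p ∈ res.items, (Prod.snd p).keys.Nodup

theorem pm_inv_getD (res : PySem.Dict String (PySem.Dict String (List String))) (h1 : String)
    (h : pmInv res) : (res.getD h1 PySem.Dict.empty).keys.Nodup := by
  cases hg : res.get? h1 with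
  | none =>
    rw [PySem.Dict.getD_eq_get?_getD, hg]
    simp [PySem.Dict.keys_empty]
  | some i =>
    rw [PySem.Dict.getD_of_get?_eq_some _ _ hg]
    exact h.2 _ (PySem.Dict.mem_items_of_get?_eq_some _ hg)

theorem pm_inv_modify (res : PySem.Dict String (PySem.Dict String (List String))) (h1 : String)
    (f : PySem.Dict String (List String) → PySem.Dict String (List String)) (h : pmInv res)
    (hf : ∀ i : PySem.Dict String (List String), i.keys.Nodup → (f i).keys.Nodup) :
    pmInv (res.modify h1 PySem.Dict.empty f) := by
  constructor
  · exact pm_nodup_modify _ _ _ _ h.1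
  · intro p hp
    simp only [PySem.Dict.modify] at hp
    rcases (PySem.Dict.mem_items_insert _ _ _ _).1 hp with h' | ⟨h', _⟩
    · rw [h']
      exact hf _ (pm_inv_getD res h1 h)
    · exact h.2 _ h'

theorem pm_nodup_applyBody (sub : PySem.Dict String (List String)) (body : List String)
    (h : sub.keys.Nodup) : (pmApplyBody sub body).keys.Nodup := by
  unfold pmApplyBody
  exact PySem.Dict.nodup_keys_foldl_modify_key (pmSeg "## " body) Prod.fst []
    (fun _ c => fun v => v ++ c.2) sub h

-- ---- the content phase: A appends each plain line to result[h1][h2] ----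

theorem pm_content (content : List String)
    (hc : ∀ x ∈ content, PySem.Str.startswith x "# " = false ∧ PySem.Str.startswith x "## " = false) :
    ∀ (acc : List String) (res : PySem.Dict String (PySem.Dict String (List String))) (h1 h2 : String),
    content.foldl pmStep
      (res.modify h1 PySem.Dict.empty (fun i => i.modify h2 [] (fun c => c ++ acc)), some h1, some h2)
    = (res.modify h1 PySem.Dict.empty (fun i => i.modify h2 [] (fun c => c ++ (acc ++ content))),
       some h1, some h2) := by
  induction content with
  | nil => intro acc res h1 h2; simp
  | cons l t ih =>
    intro acc res h1 h2
    obtain ⟨h1f, h2f⟩ := hc l (List.mem_cons_self)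
    rw [List.foldl_cons]
    have hstep : pmStep
        (res.modify h1 PySem.Dict.empty (fun i => i.modify h2 [] (fun c => c ++ acc)), some h1, some h2) l
        = (res.modify h1 PySem.Dict.empty (fun i => i.modify h2 [] (fun c => c ++ (acc ++ [l]))),
           some h1, some h2) := by
      simp only [pmStep, h1f, h2f, Bool.false_eq_true, if_false]
      rw [pm_modify_modify]
      have hfun : (fun v : PySem.Dict String (List String) =>
            (v.modify h2 [] (fun c => c ++ acc)).modify h2 [] (fun c => c ++ [l]))
          = (fun i : PySem.Dict String (List String) => i.modify h2 [] (fun c => c ++ (acc ++ [l]))) := by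
        funext v
        rw [pm_modify_modify]
        congr 1
        funext c
        rw [List.append_assoc]
      rw [hfun]
    rw [hstep, ih (fun x hx => hc x (List.mem_cons_of_mem _ hx)) (acc ++ [l]) res h1 h2]
    have : (acc ++ [l]) ++ t = acc ++ (l :: t) := by simp
    rw [this]

-- ---- pmSeg unfolding and dropWhile shape ----

theorem pm_seg_nil (pre : String) : pmSeg pre [] = [] := by rw [pmSeg]

theorem pm_seg_cons_pos (pre l : String) (rest : List String)
    (h : PySem.Str.startswith l pre = true) :
    pmSeg pre (l :: rest) =
      (PySem.Str.strip (PySem.Str.slice l (some (PySem.Str.len pre)) none),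
        rest.takeWhile (fun x => !PySem.Str.startswith x pre)) ::
      pmSeg pre (rest.dropWhile (fun x => !PySem.Str.startswith x pre)) := by
  have h' : PySem.Chars.startswith l.toList pre.toList = true := by simpa using h
  rw [pmSeg]; simp [h']

theorem pm_seg_cons_neg (pre l : String) (rest : List String)
    (h : PySem.Str.startswith l pre = false) :
    pmSeg pre (l :: rest) = pmSeg pre rest := by
  have h' : PySem.Chars.startswith l.toList pre.toList = false := by simpa using h
  rw [pmSeg]; simp [h']

theorem pm_applyBody_nil (sub : PySem.Dict String (List String)) : pmApplyBody sub [] = sub := by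
  simp [pmApplyBody, pm_seg_nil]

theorem pm_dropWhile_head {α : Type} (p : α → Bool) (l : List α) :
    l.dropWhile p = [] ∨ ∃ a t, l.dropWhile p = a :: t ∧ p a = false := by
  cases hd : l.dropWhile p with
  | nil => exact Or.inl rfl
  | cons a t =>
    refine Or.inr ⟨a, t, rfl, ?_⟩
    have := List.head_dropWhile_not p (l := l) (by simp [hd])
    simpa [hd] using this

theorem pm_len_h1 : PySem.Str.len "# " = 2 := by decide
theorem pm_len_h2 : PySem.Str.len "## " = 3 := by decide

-- ---- an empty foldl step list: A leaves the dict unchanged ----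

theorem pm_body_nil (res : PySem.Dict String (PySem.Dict String (List String))) (h1 : String)
    (oh2 : Option String) (hinv : pmInv res) (hc : res.contains h1 = true) :
    ([] : List String).foldl pmStep (res, some h1, oh2)
      = (res.modify h1 PySem.Dict.empty (fun sub => pmApplyBody sub []), some h1, oh2) := by
  simp only [List.foldl_nil]
  obtain ⟨inner, hg⟩ := pm_get?_of_contains res h1 hc
  rw [pm_modify_id res PySem.Dict.empty _ hinv.1 hg (pm_applyBody_nil inner)]

-- ---- the body of one h1-block, starting at a '## ' line (or empty) ----

theorem pm_body2 : ∀ (n : Nat) (body : List String)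
    (res : PySem.Dict String (PySem.Dict String (List String))) (h1 : String) (oh2 : Option String),
    body.length ≤ n → pmInv res → res.contains h1 = true →
    (body = [] ∨ ∃ b bs, body = b :: bs ∧ PySem.Str.startswith b "## " = true) →
    (∀ x ∈ body, PySem.Str.startswith x "# " = false) →
    ∃ oh2', body.foldl pmStep (res, some h1, oh2)
      = (res.modify h1 PySem.Dict.empty (fun sub => pmApplyBody sub body), some h1, oh2') := by
  intro n
  induction n with
  | zero =>
    intro body res h1 oh2 hlen hinv hc _ _
    have hb : body = [] := List.length_eq_zero_iff.1 (Nat.le_zero.1 hlen)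
    subst hb
    exact ⟨oh2, pm_body_nil res h1 oh2 hinv hc⟩
  | succ n ih =>
    intro body res h1 oh2 hlen hinv hc hhead hnp
    rcases hhead with rfl | ⟨b, bs, rfl, hb2⟩
    · exact ⟨oh2, pm_body_nil res h1 oh2 hinv hc⟩
    obtain ⟨inner, hg⟩ := pm_get?_of_contains res h1 hc
    have hgd : res.getD h1 PySem.Dict.empty = inner := PySem.Dict.getD_of_get?_eq_some _ _ hg
    have hin : inner.keys.Nodup := hinv.2 _ (PySem.Dict.mem_items_of_get?_eq_some _ hg)
    have hb1 : PySem.Str.startswith b "# " = false := hnp b List.mem_cons_self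
    set h2 := PySem.Str.strip (PySem.Str.slice b (some 3) none) with hh2
    have hstep : pmStep (res, some h1, oh2) b
        = (res.modify h1 PySem.Dict.empty (fun i => i.modify h2 [] (fun c => c ++ [])),
           some h1, some h2) := by
      simp only [pmStep, hb1, hb2, Bool.false_eq_true, if_false, if_true]
      rw [hgd]
      cases hic : inner.contains h2 with
      | true =>
        simp only [if_true]
        obtain ⟨cv, hcg⟩ := pm_get?_of_contains inner h2 hic
        have hmi : inner.modify h2 [] (fun c => c ++ []) = inner :=
          pm_modify_id inner [] _ hin hcg (by simp)
        rw [pm_modify_id res PySem.Dict.empty _ hinv.1 hg hmi]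
      | false =>
        simp only [Bool.false_eq_true, if_false, Prod.mk.injEq]
        refine ⟨pm_modify_congr res PySem.Dict.empty PySem.Dict.empty _ _ hg ?_, trivial, rfl⟩
        have hic' : inner.contains (PySem.Str.strip (PySem.Str.slice b (some 3)) ) = false := hic
        simp [PySem.Dict.modify, PySem.Dict.getD_of_not_contains _ _ hic', hh2]
    set content := bs.takeWhile (fun x => !PySem.Str.startswith x "## ") with hcontent
    set rest2 := bs.dropWhile (fun x => !PySem.Str.startswith x "## ") with hrest2
    have hbs : content ++ rest2 = bs := List.takeWhile_append_dropWhile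
    have hcc : ∀ x ∈ content,
        PySem.Str.startswith x "# " = false ∧ PySem.Str.startswith x "## " = false := by
      intro x hx
      refine ⟨hnp x (List.mem_cons_of_mem _ ?_), ?_⟩
      · rw [← hbs]; exact List.mem_append_left _ hx
      · have := List.mem_takeWhile_imp hx
        simpa using this
    have hcont := pm_content content hcc [] res h1 h2
    simp only [List.nil_append] at hcont
    set res2 := res.modify h1 PySem.Dict.empty (fun i => i.modify h2 [] (fun c => c ++ content))
      with hres2
    have hinv2 : pmInv res2 :=
      pm_inv_modify res h1 _ hinv (fun i hi => pm_nodup_modify _ _ _ _ hi)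
    have hc2 : res2.contains h1 = true := by
      rw [hres2, PySem.Dict.contains_modify]; simp
    have hr2len : rest2.length ≤ n := by
      have h1' : rest2.length ≤ bs.length := List.length_dropWhile_le _ _
      have h2' : bs.length + 1 ≤ n + 1 := by simpa using hlen
      omega
    have hr2np : ∀ x ∈ rest2, PySem.Str.startswith x "# " = false := by
      intro x hx
      refine hnp x (List.mem_cons_of_mem _ ?_)
      rw [← hbs]; exact List.mem_append_right _ hx
    have hr2head : rest2 = [] ∨ ∃ a t, rest2 = a :: t ∧ PySem.Str.startswith a "## " = true := by
      rcases pm_dropWhile_head (fun x => !PySem.Str.startswith x "## ") bs with h | ⟨a, t, hd, hp⟩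
      · exact Or.inl h
      · refine Or.inr ⟨a, t, hd, ?_⟩
        simpa using hp
    obtain ⟨oh2', hrest⟩ := ih rest2 res2 h1 (some h2) hr2len hinv2 hc2 hr2head hr2np
    refine ⟨oh2', ?_⟩
    have hsplit : (b :: bs).foldl pmStep (res, some h1, oh2)
        = rest2.foldl pmStep (res2, some h1, some h2) := by
      rw [List.foldl_cons, hstep]
      conv_lhs => rw [← hbs]
      rw [List.foldl_append, hcont]
    rw [hsplit, hrest]
    congr 1
    rw [hres2, pm_modify_modify]
    congr 1
    funext v
    simp only [pmApplyBody]
    rw [pm_seg_cons_pos "## " b bs hb2, List.foldl_cons, pm_len_h2]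

-- ---- the whole body of one h1-block (prelude before the first '## ' is dropped) ----

theorem pm_body1 : ∀ (n : Nat) (body : List String)
    (res : PySem.Dict String (PySem.Dict String (List String))) (h1 : String),
    body.length ≤ n → pmInv res → res.contains h1 = true →
    (∀ x ∈ body, PySem.Str.startswith x "# " = false) →
    ∃ oh2', body.foldl pmStep (res, some h1, none)
      = (res.modify h1 PySem.Dict.empty (fun sub => pmApplyBody sub body), some h1, oh2') := by
  intro n
  induction n with
  | zero =>
    intro body res h1 hlen hinv hc _
    have hb : body = [] := List.length_eq_zero_iff.1 (Nat.le_zero.1 hlen)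
    subst hb
    exact ⟨none, pm_body_nil res h1 none hinv hc⟩
  | succ n ih =>
    intro body res h1 hlen hinv hc hnp
    cases body with
    | nil => exact ⟨none, pm_body_nil res h1 none hinv hc⟩
    | cons b bs =>
      cases hb2 : PySem.Str.startswith b "## " with
      | true =>
        exact pm_body2 (n + 1) (b :: bs) res h1 none hlen hinv hc
          (Or.inr ⟨b, bs, rfl, hb2⟩) hnp
      | false =>
        have hb1 : PySem.Str.startswith b "# " = false := hnp b List.mem_cons_self
        have hstep : pmStep (res, some h1, none) b = (res, some h1, none) := by
          have hb1' : PySem.Chars.startswith b.toList ['#', ' '] = false := by simpa using hb1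
          have hb2' : PySem.Chars.startswith b.toList ['#', '#', ' '] = false := by simpa using hb2
          simp [pmStep, hb1', hb2']
        obtain ⟨oh2', hrec⟩ := ih bs res h1 (by simpa using Nat.le_of_succ_le_succ (by simpa using hlen))
          hinv hc (fun x hx => hnp x (List.mem_cons_of_mem _ hx))
        refine ⟨oh2', ?_⟩
        rw [List.foldl_cons, hstep, hrec]
        have hfun : (fun sub : PySem.Dict String (List String) => pmApplyBody sub bs)
            = (fun sub : PySem.Dict String (List String) => pmApplyBody sub (b :: bs)) := by
          funext v
          simp only [pmApplyBody]
          rw [pm_seg_cons_neg "## " b bs hb2]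
        rw [hfun]

-- ---- the outer loop, from a state about to read a '# ' line (or the end of input) ----

theorem pm_outer2 : ∀ (n : Nat) (ls : List String)
    (res : PySem.Dict String (PySem.Dict String (List String)))
    (o1 o2 : Option String),
    ls.length ≤ n → pmInv res →
    (ls = [] ∨ ∃ a t, ls = a :: t ∧ PySem.Str.startswith a "# " = true) →
    (ls.foldl pmStep (res, o1, o2)).1
      = (pmSeg "# " ls).foldl
          (fun r b => r.modify b.1 PySem.Dict.empty (fun sub => pmApplyBody sub b.2)) res := by
  intro n
  induction n with
  | zero =>
    intro ls res o1 o2 hlen _ _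
    have hb : ls = [] := List.length_eq_zero_iff.1 (Nat.le_zero.1 hlen)
    subst hb
    simp [pm_seg_nil]
  | succ n ih =>
    intro ls res o1 o2 hlen hinv hhead
    rcases hhead with rfl | ⟨a, t, rfl, ha⟩
    · simp [pm_seg_nil]
    set h1 := PySem.Str.strip (PySem.Str.slice a (some 2) none) with hh1
    set res1 := (if res.contains h1 then res else res.insert h1 PySem.Dict.empty) with hres1
    have hstep : pmStep (res, o1, o2) a = (res1, some h1, none) := by
      have ha' : PySem.Chars.startswith a.toList ['#', ' '] = true := by simpa using ha
      simp [pmStep, ha', hres1, hh1]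
    have hinv1 : pmInv res1 := by
      rw [hres1]
      cases hcr : res.contains h1 with
      | true => simpa using hinv
      | false =>
        simp only [Bool.false_eq_true, if_false]
        constructor
        · exact PySem.Dict.nodup_keys_insert _ _ _ hinv.1
        · intro p hp
          rcases (PySem.Dict.mem_items_insert _ _ _ _).1 hp with h' | ⟨h', _⟩
          · rw [h']; simp [PySem.Dict.keys_empty]
          · exact hinv.2 _ h'
    have hc1 : res1.contains h1 = true := by
      rw [hres1]
      cases hcr : res.contains h1 with
      | true => simpa using hcr
      | false => simp
    set body := t.takeWhile (fun x => !PySem.Str.startswith x "# ") with hbody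
    set rest' := t.dropWhile (fun x => !PySem.Str.startswith x "# ") with hrest'
    have hbs : body ++ rest' = t := List.takeWhile_append_dropWhile
    have hbnp : ∀ x ∈ body, PySem.Str.startswith x "# " = false := by
      intro x hx
      have := List.mem_takeWhile_imp hx
      simpa using this
    have hblen : body.length ≤ n := by
      have h1' : body.length ≤ t.length := (List.takeWhile_sublist _).length_le
      have h2' : t.length + 1 ≤ n + 1 := by simpa using hlen
      omega
    obtain ⟨oh2', hbodyrun⟩ := pm_body1 n body res1 h1 hblen hinv1 hc1 hbnp
    set resB := res.modify h1 PySem.Dict.empty (fun sub => pmApplyBody sub body) with hresB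
    have hcollapse : res1.modify h1 PySem.Dict.empty (fun sub => pmApplyBody sub body) = resB := by
      rw [hresB, hres1]
      cases hcr : res.contains h1 with
      | true => simp
      | false =>
        simp only [Bool.false_eq_true, if_false]
        simp [PySem.Dict.modify, PySem.Dict.getD_insert_self, PySem.Dict.insert_insert_self,
          PySem.Dict.getD_of_not_contains _ _ hcr]
    have hinvB : pmInv resB :=
      pm_inv_modify res h1 _ hinv (fun i hi => pm_nodup_applyBody _ _ hi)
    have hrlen : rest'.length ≤ n := by
      have h1' : rest'.length ≤ t.length := List.length_dropWhile_le _ _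
      have h2' : t.length + 1 ≤ n + 1 := by simpa using hlen
      omega
    have hrhead : rest' = [] ∨ ∃ a' t', rest' = a' :: t' ∧ PySem.Str.startswith a' "# " = true := by
      rcases pm_dropWhile_head (fun x => !PySem.Str.startswith x "# ") t with h | ⟨a', t', hd, hp⟩
      · exact Or.inl h
      · refine Or.inr ⟨a', t', hd, ?_⟩
        simpa using hp
    have hrest := ih rest' resB (some h1) oh2' hrlen hinvB hrhead
    have hsplit : (a :: t).foldl pmStep (res, o1, o2)
        = rest'.foldl pmStep (resB, some h1, oh2') := by
      rw [List.foldl_cons, hstep]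
      conv_lhs => rw [← hbs]
      rw [List.foldl_append, hbodyrun, hcollapse]
    rw [hsplit, hrest]
    rw [pm_seg_cons_pos "# " a t ha, List.foldl_cons, pm_len_h1]

-- ---- the outer loop from the initial state: lines before the first '# ' are dropped ----

theorem pm_outer1 : ∀ (n : Nat) (ls : List String)
    (res : PySem.Dict String (PySem.Dict String (List String))),
    ls.length ≤ n → pmInv res →
    (ls.foldl pmStep (res, none, none)).1
      = (pmSeg "# " ls).foldl
          (fun r b => r.modify b.1 PySem.Dict.empty (fun sub => pmApplyBody sub b.2)) res := by
  intro n
  induction n with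
  | zero =>
    intro ls res hlen _
    have hb : ls = [] := List.length_eq_zero_iff.1 (Nat.le_zero.1 hlen)
    subst hb
    simp [pm_seg_nil]
  | succ n ih =>
    intro ls res hlen hinv
    cases ls with
    | nil => simp [pm_seg_nil]
    | cons a t =>
      cases ha : PySem.Str.startswith a "# " with
      | true =>
        exact pm_outer2 (n + 1) (a :: t) res none none hlen hinv (Or.inr ⟨a, t, rfl, ha⟩)
      | false =>
        have hstep : pmStep (res, none, none) a = (res, none, none) := by
          have ha' : PySem.Chars.startswith a.toList ['#', ' '] = false := by simpa using ha
          cases hb : PySem.Chars.startswith a.toList ['#', '#', ' '] <;> simp [pmStep, ha', hb]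
        rw [List.foldl_cons, hstep, pm_seg_cons_neg "# " a t ha]
        exact ih t res (by simpa using Nat.le_of_succ_le_succ (by simpa using hlen)) hinv

theorem pm_inv_empty : pmInv (PySem.Dict.empty : PySem.Dict String (PySem.Dict String (List String))) := by
  constructor
  · simp [PySem.Dict.keys_empty]
  · intro p hp
    simp [PySem.Dict.empty] at hp

theorem pm_main (lines : List String) : parse_md lines = parse_md_alt lines := by
  show ((lines.foldl pmStep (PySem.Dict.empty, none, none)).1.items.map (fun p => (p.1, p.2.items)))
    = _
  rw [pm_outer1 lines.length lines PySem.Dict.empty le_rfl pm_inv_empty]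
  rfl

-- ===== VERDICT (by name: the statement is the Claim_ definition above) =====
theorem parse_md_spec : Claim_equal_parse_md := by
  intro lines _
  exact pm_main lines
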